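-- pv_equiv track=rewrite | github.com/klhutchins1/sre-certificate-management | cert_scanner/settings.py | _is_network_path
-- ===== SOURCE A (Python) =====
-- def _is_network_path(path):
--     """Check if a path is a valid network path format"""
--     if not isinstance(path, str):
--         return False
--
--     # Normalize path separators
--     path = path.replace('\\', '/')
--
--     # Check for UNC path format (//server/share/...)
--     if not path.startswith('//'):
--         return False
--
--     # Split path into components
--     parts = [p for p in path.split('/') if p]
--
--     # Network path should have at least server and share
--     if len(parts) < 2:
--         return False
--
--     # Server name should not be empty
--     if not parts[0]:
--         return False
--
--     # Share name should not be empty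
--     if not parts[1]:
--         return False
--
--     return True
-- ===== SOURCE B (Python) =====
-- import re
--
-- _UNC_RE = re.compile(r'/{2,}[^/]+/+[^/]+')
--
--
-- def _is_network_path(path):
--     """Check if a path is a valid network path format"""
--     if not isinstance(path, str):
--         return False
--     # Anchored pattern: two-or-more slashes, a non-empty server token,
--     # one-or-more separators, a non-empty share token.
--     return _UNC_RE.match(path.replace('\\', '/')) is not None
-- ===== Notes on version B (the rewrite author's own statement) =====
-- stated objective: idiomatic
-- what changed: Replaces the split-into-components-and-filter pipeline with a single anchored regex (one deterministic left-to-right scan, no token list built).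
import Mathlib
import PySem

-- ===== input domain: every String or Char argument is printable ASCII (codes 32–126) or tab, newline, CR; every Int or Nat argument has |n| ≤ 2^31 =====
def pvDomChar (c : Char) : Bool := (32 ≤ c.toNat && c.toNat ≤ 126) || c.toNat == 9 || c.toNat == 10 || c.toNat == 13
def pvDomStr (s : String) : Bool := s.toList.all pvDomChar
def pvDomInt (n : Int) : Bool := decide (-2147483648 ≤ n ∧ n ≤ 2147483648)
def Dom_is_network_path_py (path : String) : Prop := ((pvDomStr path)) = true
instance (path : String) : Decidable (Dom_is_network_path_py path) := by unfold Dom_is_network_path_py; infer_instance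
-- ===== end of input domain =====

-- B validates the UNC shape with one anchored pattern scan instead of A's split-and-filter; objective: idiomatic.

-- ===== PORT A =====
def is_network_path_py (path : String) : Bool :=
  let p := PySem.Str.replace path "\\" "/"
  if !(PySem.Str.startswith p "//") then false
  else
    let parts := ((PySem.Str.split? p "/").getD []).filter (fun q => q != "")
    if parts.length < 2 then false
    else if (PySem.List.pyGet? parts 0).getD "" == "" then false
    else if (PySem.List.pyGet? parts 1).getD "" == "" then false
    else true

-- ===== PORT B =====
-- Hand port of re.match(r'/{2,}[^/]+/+[^/]+', p): the three character classes are
-- disjoint, so the greedy match is a deterministic left-to-right scan; exact for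
-- this pattern (anchored at the start, prefix match suffices).
def is_network_path_py_alt (path : String) : Bool :=
  match (PySem.Str.replace path "\\" "/").toList with
  | '/' :: '/' :: rest =>
      let r1 := rest.dropWhile (fun c => c == '/')   -- rest of /{2,}
      let r2 := r1.dropWhile (fun c => c != '/')     -- [^/]+  (server)
      let r3 := r2.dropWhile (fun c => c == '/')     -- /+
      !r1.isEmpty && !r2.isEmpty && !r3.isEmpty      -- …and [^/]+ (share) nonempty
  | _ => false

-- ===== PRECONDITION & SPEC =====
def Spec_is_network_path_py (path : String) (out : Bool) : Prop := out = is_network_path_py_alt path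
instance (path : String) (out : Bool) : Decidable (Spec_is_network_path_py path out) := by unfold Spec_is_network_path_py; infer_instance

-- ===== CLAIM (what is proved, stated in full; the proofs are below) =====
def Claim_equal_is_network_path_py : Prop := ∀ (path : String), Dom_is_network_path_py path → Spec_is_network_path_py path (is_network_path_py path)

-- ===== LEMMAS AND PROOFS =====

-- mirror of PySem.Chars.splitOn.go for the one-char separator '/', without fuel/accumulator
def spTok (cur : List Char) : List Char → List (List Char)
  | [] => [cur.reverse]
  | c :: rest => if c = '/' then cur.reverse :: spTok [] rest else spTok (c :: cur) rest

-- number of nonempty '/'-separated tokens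
def nTok (l : List Char) : Nat := ((spTok [] l).filter (fun t => !t.isEmpty)).length

lemma go_eq_spTok : ∀ (fuel : Nat) (l cur : List Char) (acc : List (List Char)),
    l.length ≤ fuel →
    PySem.Chars.splitOn.go ['/'] fuel l cur acc = acc.reverse ++ spTok cur l := by
  intro fuel
  induction fuel with
  | zero =>
    intro l cur acc h
    have : l = [] := List.length_eq_zero_iff.mp (Nat.le_zero.mp h)
    subst this
    simp [PySem.Chars.splitOn.go, spTok]
  | succ n ih =>
    intro l cur acc h
    cases l with
    | nil => simp [PySem.Chars.splitOn.go, spTok]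
    | cons c rest =>
      rw [PySem.Chars.splitOn.go]
      by_cases hc : c = '/'
      · subst hc
        have hpre : List.isPrefixOf ['/'] ('/' :: rest) = true := by
          simp [List.isPrefixOf]
        rw [if_pos hpre]
        have : List.drop (List.length ['/']) ('/' :: rest) = rest := by simp
        rw [this, ih rest [] (cur.reverse :: acc) (by simpa using Nat.le_of_succ_le_succ h)]
        simp [spTok]
      · have hpre : List.isPrefixOf ['/'] (c :: rest) = false := by
          simp [List.isPrefixOf]
          exact fun h => hc h.symm
        rw [if_neg (by simp [hpre])]
        rw [ih rest (c :: cur) acc (by simpa using Nat.le_of_succ_le_succ h)]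
        simp [spTok, hc]

lemma splitOn_slash (cs : List Char) : PySem.Chars.splitOn cs ['/'] = spTok [] cs := by
  rw [PySem.Chars.splitOn, go_eq_spTok (cs.length + 1) cs [] [] (Nat.le_succ _)]
  simp

lemma nTok_cons_slash (l : List Char) : nTok ('/' :: l) = nTok l := by
  simp [nTok, spTok]

lemma nTok_dropSlash (l : List Char) : nTok (l.dropWhile (fun c => c == '/')) = nTok l := by
  induction l with
  | nil => rfl
  | cons c rest ih =>
    by_cases hc : c = '/'
    · subst hc; simpa using ih
    · simp [hc]

lemma spTok_cur_len (l : List Char) : ∀ cur : List Char, cur ≠ [] →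
    ((spTok cur l).filter (fun t => !t.isEmpty)).length
      = 1 + nTok (l.dropWhile (fun c => c != '/')) := by
  induction l with
  | nil => intro cur hcur; simp [spTok, nTok, hcur]
  | cons c rest ih =>
    intro cur hcur
    by_cases hc : c = '/'
    · subst hc
      simp only [spTok, List.dropWhile_cons]
      simp [hcur, nTok]
      have : nTok ('/' :: rest) = nTok rest := nTok_cons_slash rest
      simp [nTok] at this ⊢
      omega
    · simp only [spTok, if_neg hc, List.dropWhile_cons]
      rw [ih (c :: cur) (by simp)]
      simp [hc]

lemma nTok_cons_ne (c : Char) (rest : List Char) (hc : c ≠ '/') :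
    nTok (c :: rest) = 1 + nTok (rest.dropWhile (fun x => x != '/')) := by
  simp only [nTok, spTok, if_neg hc]
  exact spTok_cur_len rest [c] (by simp)

-- core count lemma: B's three-phase scan decides 2 <= nTok
lemma count_iff (rest : List Char) :
    decide (2 ≤ nTok rest)
      = (let r1 := rest.dropWhile (fun c => c == '/')
         let r2 := r1.dropWhile (fun c => c != '/')
         let r3 := r2.dropWhile (fun c => c == '/')
         (!r1.isEmpty && !r2.isEmpty && !r3.isEmpty)) := by
  simp only []
  have h1 : nTok rest = nTok (rest.dropWhile (fun c => c == '/')) :=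
    (nTok_dropSlash rest).symm
  cases hr1 : rest.dropWhile (fun c => c == '/') with
  | nil =>
    have h0 : nTok rest = 0 := by rw [h1, hr1]; simp [nTok, spTok]
    simp [h0]
  | cons c r =>
    have hc : c ≠ '/' := by
      have := List.head_dropWhile_not (p := fun c => c == '/') (l := rest)
      rw [hr1] at this
      simpa using this (by simp)
    have hbne : (c != '/') = true := by simp [hc]
    have hA : nTok rest = 1 + nTok (r.dropWhile (fun x => x != '/')) := by
      rw [h1, hr1, nTok_cons_ne c r hc]
    have hstep : (c :: r).dropWhile (fun c => c != '/') = r.dropWhile (fun c => c != '/') := by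
      simp [hbne]
    cases hr2 : r.dropWhile (fun c => c != '/') with
    | nil =>
      have h01 : nTok rest = 1 := by rw [hA, hr2]; simp [nTok, spTok]
      simp [hstep, hr2, h01]
    | cons d r' =>
      have hd : d = '/' := by
        have := List.head_dropWhile_not (p := fun c => c != '/') (l := r)
        rw [hr2] at this
        simpa using this (by simp)
      subst hd
      have h2 : nTok ('/' :: r') = nTok (('/' :: r').dropWhile (fun c => c == '/')) :=
        (nTok_dropSlash _).symm
      cases hr3 : ('/' :: r').dropWhile (fun c => c == '/') with
      | nil =>
        have h01 : nTok rest = 1 := by rw [hA, hr2, h2, hr3]; simp [nTok, spTok]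
        simp [hstep, hr2, hr3, h01]
      | cons e r'' =>
        have he : e ≠ '/' := by
          have := List.head_dropWhile_not (p := fun c => c == '/') (l := ('/' :: r'))
          rw [hr3] at this
          simpa using this (by simp)
        have hge : 2 ≤ nTok rest := by
          rw [hA, hr2, h2, hr3, nTok_cons_ne e r'' he]
          omega
        simp [hstep, hr2, hr3, hge]

lemma ofList_beq_empty (t : List Char) : (String.ofList t == "") = t.isEmpty := by
  by_cases h : t = []
  · subst h; rfl
  · have hne : String.ofList t ≠ "" := fun he =>
      h (by simpa [String.toList_ofList] using congrArg String.toList he)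
    have h1 : (String.ofList t == "") = false := beq_eq_false_iff_ne.mpr hne
    have h2 : t.isEmpty = false := by simpa using h
    rw [h1, h2]

-- A's tail (length/parts[0]/parts[1] checks) on a list of nonempty tokens decides 2 <= length
lemma A_branch (T : List (List Char)) (hT : ∀ t ∈ T, t ≠ []) :
    (if (T.map String.ofList).length < 2 then false
     else if ((PySem.List.pyGet? (T.map String.ofList) 0).getD "" == "") = true then false
     else if ((PySem.List.pyGet? (T.map String.ofList) 1).getD "" == "") = true then false
     else true) = decide (2 ≤ T.length) := by
  match T with
  | [] => simp
  | [a] => simp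
  | a :: b :: L =>
    have ha : a ≠ [] := hT a (by simp)
    have hb : b ≠ [] := hT b (by simp)
    have hga : (PySem.List.pyGet? (String.ofList a :: String.ofList b :: L.map String.ofList) 0).getD ""
        = String.ofList a := by
      have hnn : (0:Int) ≤ (L.length:Int) + 1 := by positivity
      simp [PySem.List.pyGet?, PySem.List.pyIdx?, hnn]
    have hgb : (PySem.List.pyGet? (String.ofList a :: String.ofList b :: L.map String.ofList) 1).getD ""
        = String.ofList b := by
      simp [PySem.List.pyGet?, PySem.List.pyIdx?]
    simp only [List.map_cons, List.length_cons, hga, hgb, ofList_beq_empty]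
    have ha' : a.isEmpty = false := by simpa using ha
    have hb' : b.isEmpty = false := by simpa using hb
    simp [ha', hb']

theorem is_network_path_py_spec : Claim_equal_is_network_path_py := by
  intro path _
  unfold Spec_is_network_path_py is_network_path_py is_network_path_py_alt
  set p := PySem.Str.replace path "\\" "/" with hp
  have hsplit : (PySem.Str.split? p "/").getD []
      = (PySem.Chars.splitOn p.toList ['/']).map String.ofList := by
    simp [PySem.Str.split?, PySem.Chars.split?]
  by_cases hsw : PySem.Str.startswith p "//" = true
  · -- p starts with '//': reduce A to the token count, B to the three-phase scan
    have hshape : ∃ rest, p.toList = '/' :: '/' :: rest := by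
      rw [PySem.Str.startswith_eq] at hsw
      have := PySem.Chars.startswith_iff (s := p.toList) (p := "//".toList) |>.mp hsw
      obtain ⟨t, ht⟩ := this
      exact ⟨t, by simpa using ht.symm⟩
    obtain ⟨rest, hrest⟩ := hshape
    simp only [hsw, Bool.not_true, Bool.false_eq_true, if_false, hsplit, splitOn_slash, hrest]
    have hfil : ((spTok [] ('/' :: '/' :: rest)).map String.ofList).filter (fun q => q != "")
        = ((spTok [] ('/' :: '/' :: rest)).filter (fun t => !t.isEmpty)).map String.ofList := by
      rw [List.filter_map]
      congr 1
      apply List.filter_congr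
      intro t _
      simp [bne, ofList_beq_empty]
    rw [hfil, A_branch _ (fun t ht => by simpa using (List.of_mem_filter ht))]
    show decide (2 ≤ nTok ('/' :: '/' :: rest)) = _
    rw [(nTok_cons_slash ('/' :: rest)).trans (nTok_cons_slash rest), count_iff rest]
  · -- no leading '//': both sides are false
    have hsw' : PySem.Str.startswith p "//" = false := by
      cases h : PySem.Str.startswith p "//" <;> simp_all
    simp only [hsw', Bool.not_false, if_true]
    cases hcs : p.toList with
    | nil => rfl
    | cons c t =>
      rw [PySem.Str.startswith_eq] at hsw'
      cases t with
      | nil =>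
        cases hc : c == '/' <;> simp_all
      | cons d u =>
        by_cases hc : c = '/'
        · by_cases hd : d = '/'
          · exfalso
            subst hc; subst hd
            rw [hcs] at hsw'
            simp [PySem.Chars.startswith, List.isPrefixOf] at hsw'
          · subst hc
            simp [hd]
        · simp [hc]
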